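-- pv_equiv track=rewrite | github.com/sam-072/data-structure | Dynamic programming/Adjacents are not allowed.py | AdjMax
-- ===== SOURCE A (Python) =====
-- def AdjMax(a,n):
--     if n == 1:
--         return max(a[0][0], a[1][0])
--     if n == 2:
--         return max(a[0][0],a[0][1],a[1][0],a[1][1])
--     dp = [0 for i in range(n+1)]
--     dp[1] = max(a[0][0], a[1][0])
--     dp[2] = max(a[0][0],a[0][1],a[1][0],a[1][1])
--     for i in range(3,n+1):
--         dp[i] = max(dp[i-1], max(a[0][i-1],a[1][i-1])+dp[i-2])
--     return dp[n]
-- ===== SOURCE B (Python) =====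
-- def AdjMax(a, n):
--     # Top-down memoized recursion on the same recurrence (vs A's bottom-up dp array).
--     if n == 1:
--         return max(a[0][0], a[1][0])
--     if n == 2:
--         return max(a[0][0], a[0][1], a[1][0], a[1][1])
--     memo = {}
--     def f(i):
--         if i == 1:
--             return max(a[0][0], a[1][0])
--         if i == 2:
--             return max(a[0][0], a[0][1], a[1][0], a[1][1])
--         if i not in memo:
--             memo[i] = max(f(i - 1), max(a[0][i - 1], a[1][i - 1]) + f(i - 2))
--         return memo[i]
--     return f(n)
-- ===== Notes on version B (the rewrite author's own statement) =====
-- stated objective: alternative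
-- what changed: B computes the answer by a top-down memoized recursive helper f(i) (recursion on the column index with a dict cache) instead of A's bottom-up index-addressed dp array filled by a for-loop.
import Mathlib
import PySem

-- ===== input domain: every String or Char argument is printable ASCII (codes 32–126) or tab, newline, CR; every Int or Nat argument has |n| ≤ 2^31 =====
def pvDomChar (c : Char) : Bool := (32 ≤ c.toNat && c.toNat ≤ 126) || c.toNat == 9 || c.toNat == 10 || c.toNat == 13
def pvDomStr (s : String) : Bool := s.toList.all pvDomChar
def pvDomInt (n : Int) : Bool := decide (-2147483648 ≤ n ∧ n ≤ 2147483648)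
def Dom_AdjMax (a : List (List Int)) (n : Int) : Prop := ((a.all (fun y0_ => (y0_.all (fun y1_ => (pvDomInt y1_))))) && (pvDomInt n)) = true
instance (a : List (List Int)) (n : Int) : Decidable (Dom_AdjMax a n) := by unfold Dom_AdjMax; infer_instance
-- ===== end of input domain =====

-- B computes the same recurrence by a top-down recursive helper instead of A's bottom-up dp array; same values on Pre_.

-- ===== PORT A =====
-- a[r][c] (non-negative indices only); exact under Pre_AdjMax
def pvCell (a : List (List Int)) (r c : Int) : Int :=
  PySem.List.pyGetD (PySem.List.pyGetD a r []) c 0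

def AdjMax (a : List (List Int)) (n : Int) : Int :=
  if n = 1 then max (pvCell a 0 0) (pvCell a 1 0)
  else if n = 2 then
    max (max (max (pvCell a 0 0) (pvCell a 0 1)) (pvCell a 1 0)) (pvCell a 1 1)
  else
    let dp := List.replicate (n + 1).toNat (0 : Int)
    let dp := PySem.List.pySetD dp 1 (max (pvCell a 0 0) (pvCell a 1 0))
    let dp := PySem.List.pySetD dp 2
      (max (max (max (pvCell a 0 0) (pvCell a 0 1)) (pvCell a 1 0)) (pvCell a 1 1))
    let dp := (PySem.List.pyRange 3 (n + 1) 1).foldl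
      (fun dp i => PySem.List.pySetD dp i
        (max (PySem.List.pyGetD dp (i - 1) 0)
             (max (pvCell a 0 (i - 1)) (pvCell a 1 (i - 1)) + PySem.List.pyGetD dp (i - 2) 0)))
      dp
    PySem.List.pyGetD dp n 0

-- ===== PORT B =====
-- Source B's recursive helper f(i); the dict memo is pure caching of f's values, the recursion
-- structure is transcribed directly (f terminates for every Nat index; Python's f(0) region
-- lies outside Pre_).
def pvCellB (a : List (List Int)) (r c : Int) : Int :=
  PySem.List.pyGetD (PySem.List.pyGetD a r []) c 0

def pvFB (a : List (List Int)) : Nat → Int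
  | 0 => 0
  | 1 => max (pvCellB a 0 0) (pvCellB a 1 0)
  | 2 => max (max (max (pvCellB a 0 0) (pvCellB a 0 1)) (pvCellB a 1 0)) (pvCellB a 1 1)
  | (i + 3) => max (pvFB a (i + 2))
      (max (pvCellB a 0 ((i : Int) + 2)) (pvCellB a 1 ((i : Int) + 2)) + pvFB a (i + 1))

def AdjMax_alt (a : List (List Int)) (n : Int) : Int :=
  if n = 1 then max (pvCellB a 0 0) (pvCellB a 1 0)
  else if n = 2 then
    max (max (max (pvCellB a 0 0) (pvCellB a 0 1)) (pvCellB a 1 0)) (pvCellB a 1 1)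
  else pvFB a n.toNat

-- ===== PRECONDITION & SPEC =====
-- Pre_ excludes exactly the inputs where the Python A raises IndexError: fewer than two rows, n ≤ 0, or a row shorter than n.
def Pre_AdjMax (a : List (List Int)) (n : Int) : Prop :=
  2 ≤ a.length ∧ 1 ≤ n ∧ n ≤ ((a.getD 0 []).length : Int) ∧ n ≤ ((a.getD 1 []).length : Int)
instance (a : List (List Int)) (n : Int) : Decidable (Pre_AdjMax a n) := by unfold Pre_AdjMax; infer_instance

def pvWitness_AdjMax : List (List Int) × Int := ([[1, 2, 3], [4, 5, 6]], 3)

def Spec_AdjMax (a : List (List Int)) (n : Int) (out : Int) : Prop := out = AdjMax_alt a n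
instance (a : List (List Int)) (n : Int) (out : Int) : Decidable (Spec_AdjMax a n out) := by unfold Spec_AdjMax; infer_instance

-- ===== CLAIM (what is proved, stated in full; the proofs are below) =====
def Claim_equal_AdjMax : Prop := ∀ (a : List (List Int)) (n : Int), Dom_AdjMax a n → Pre_AdjMax a n → Spec_AdjMax a n (AdjMax a n)

-- ===== LEMMAS AND PROOFS =====

-- reference value of the recurrence, in terms of the two row lists
def pvF (top bot : List Int) : Nat → Int
  | 0 => 0
  | 1 => max (top.getD 0 0) (bot.getD 0 0)
  | 2 => max (max (max (top.getD 0 0) (top.getD 1 0)) (bot.getD 0 0)) (bot.getD 1 0)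
  | (i + 3) => max (pvF top bot (i + 2))
      (max (top.getD (i + 2) 0) (bot.getD (i + 2) 0) + pvF top bot (i + 1))

lemma getD_set_self (l : List Int) (i : Nat) (v : Int) (h : i < l.length) :
    (l.set i v).getD i 0 = v := by
  simp [List.getD_eq_getElem?_getD, h]

lemma getD_set_ne (l : List Int) (i j : Nat) (v : Int) (h : i ≠ j) :
    (l.set i v).getD j 0 = l.getD j 0 := by
  simp [List.getD_eq_getElem?_getD, h]

-- A's loop invariant
lemma a_loop (a : List (List Int)) (N : Nat) :
    ∀ (m k : Nat) (dp : List Int), N + 1 - k = m → 3 ≤ k → k ≤ N + 1 → dp.length = N + 1 →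
      (∀ j : Nat, 1 ≤ j → j < k → dp.getD j 0 = pvF (a.getD 0 []) (a.getD 1 []) j) →
      ∀ j : Nat, 1 ≤ j → j ≤ N →
        ((PySem.List.pyRange (k : Int) ((N : Int) + 1) 1).foldl
          (fun dp i => PySem.List.pySetD dp i
            (max (PySem.List.pyGetD dp (i - 1) 0)
                 (max (pvCell a 0 (i - 1)) (pvCell a 1 (i - 1)) + PySem.List.pyGetD dp (i - 2) 0)))
          dp).getD j 0 = pvF (a.getD 0 []) (a.getD 1 []) j := by
  intro m
  induction m with
  | zero =>
    intro k dp hm h3 hkN hlen hinv j hj1 hjN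
    have hk : k = N + 1 := by omega
    rw [PySem.List.pyRange_one_eq_nil (by omega)]
    exact hinv j hj1 (by omega)
  | succ m ih =>
    intro k dp hm h3 hkN hlen hinv j hj1 hjN
    have hkN' : k < N + 1 := by omega
    rw [PySem.List.pyRange_one_cons (by omega)]
    simp only [List.foldl_cons]
    have e1 : (k : Int) - 1 = ((k - 1 : Nat) : Int) := by omega
    have e2 : (k : Int) - 2 = ((k - 2 : Nat) : Int) := by omega
    have hv : max (PySem.List.pyGetD dp ((k : Int) - 1) 0)
        (max (pvCell a 0 ((k : Int) - 1)) (pvCell a 1 ((k : Int) - 1))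
          + PySem.List.pyGetD dp ((k : Int) - 2) 0)
        = pvF (a.getD 0 []) (a.getD 1 []) k := by
      rw [e1, e2, PySem.List.pyGetD_natCast, PySem.List.pyGetD_natCast,
        hinv (k - 1) (by omega) (by omega), hinv (k - 2) (by omega) (by omega)]
      obtain ⟨j', rfl⟩ : ∃ j', k = j' + 3 := ⟨k - 3, by omega⟩
      simp [pvF, pvCell, PySem.List.pyGetD_ofNat',
        show j' + 3 - 1 = j' + 2 from by omega, show j' + 3 - 2 = j' + 1 from by omega]
      rw [show ((j' : Int) + 2) = (((j' + 2 : Nat)) : Int) from by push_cast; ring,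
        PySem.List.pyGetD_natCast, PySem.List.pyGetD_natCast]
      simp [List.getD_eq_getElem?_getD]
    rw [hv, PySem.List.pySetD_natCast]
    have := ih (k + 1) (dp.set k (pvF (a.getD 0 []) (a.getD 1 []) k)) (by omega) (by omega)
      (by omega) (by simp [hlen]) ?_ j hj1 hjN
    · push_cast at this; exact this
    · intro j' hj'1 hj'k
      by_cases hj' : j' = k
      · subst hj'; exact getD_set_self _ _ _ (by omega)
      · rw [getD_set_ne _ _ _ _ (fun h => hj' h.symm)]
        exact hinv j' hj'1 (by omega)

-- B's recursion computes the same reference values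
lemma pvFB_eq (a : List (List Int)) : ∀ k : Nat,
    pvFB a k = pvF (a.getD 0 []) (a.getD 1 []) k := by
  intro k
  induction k using Nat.strong_induction_on with
  | _ k ih =>
    match k with
    | 0 => simp [pvFB, pvF]
    | 1 => simp [pvFB, pvF, pvCellB, PySem.List.pyGetD_ofNat']
    | 2 => simp [pvFB, pvF, pvCellB, PySem.List.pyGetD_ofNat']
    | (i + 3) =>
      have hc : ∀ r : Nat, pvCellB a (r : Int) ((i : Int) + 2) = (a.getD r []).getD (i + 2) 0 := by
        intro r
        simp only [pvCellB, PySem.List.pyGetD_natCast,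
          show ((i : Int) + 2) = (((i + 2 : Nat)) : Int) from by push_cast; ring]
      have hc0 := hc 0
      have hc1 := hc 1
      norm_num at hc0 hc1
      rw [pvFB, pvF, ih (i + 2) (by omega), ih (i + 1) (by omega), hc0, hc1]
      simp [List.getD_eq_getElem?_getD]

-- ===== VERDICT (by name: the statement is the Claim_ definition above) =====
theorem AdjMax_spec : Claim_equal_AdjMax := by
  intro a n _ hpre
  obtain ⟨hrows, hn1, hlen0, hlen1⟩ := hpre
  unfold Spec_AdjMax AdjMax AdjMax_alt
  by_cases h1 : n = 1
  · simp [h1, pvCell, pvCellB]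
  by_cases h2 : n = 2
  · simp [h2, pvCell, pvCellB]
  -- n ≥ 3
  simp only [h1, h2, if_false]
  obtain ⟨N, rfl⟩ : ∃ N : Nat, n = (N : Int) := ⟨n.toNat, by omega⟩
  have hN3 : 3 ≤ N := by
    rcases Nat.lt_or_ge N 3 with h | h
    · interval_cases N <;> simp_all
    · exact h
  have htop : pvCell a 0 0 = (a.getD 0 []).getD 0 0 ∧ pvCell a 1 0 = (a.getD 1 []).getD 0 0 ∧
      pvCell a 0 1 = (a.getD 0 []).getD 1 0 ∧ pvCell a 1 1 = (a.getD 1 []).getD 1 0 := by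
    refine ⟨?_, ?_, ?_, ?_⟩ <;> simp [pvCell, PySem.List.pyGetD_ofNat']
  -- left side: the dp loop computes pvF N
  have hA : (((PySem.List.pyRange 3 ((N : Int) + 1) 1).foldl
      (fun dp i => PySem.List.pySetD dp i
        (max (PySem.List.pyGetD dp (i - 1) 0)
             (max (pvCell a 0 (i - 1)) (pvCell a 1 (i - 1)) + PySem.List.pyGetD dp (i - 2) 0)))
      (PySem.List.pySetD (PySem.List.pySetD (List.replicate ((N : Int) + 1).toNat (0 : Int)) 1
          (max (pvCell a 0 0) (pvCell a 1 0))) 2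
          (max (max (max (pvCell a 0 0) (pvCell a 0 1)) (pvCell a 1 0)) (pvCell a 1 1))))).getD N 0
      = pvF (a.getD 0 []) (a.getD 1 []) N := by
    have hlen : ((N : Int) + 1).toNat = N + 1 := by omega
    have hset1 : PySem.List.pySetD (List.replicate ((N : Int) + 1).toNat (0 : Int)) 1
        (max (pvCell a 0 0) (pvCell a 1 0))
        = (List.replicate (N + 1) (0 : Int)).set 1 (max (pvCell a 0 0) (pvCell a 1 0)) := by
      rw [hlen]
      rw [show (1 : Int) = ((1 : Nat) : Int) by norm_num, PySem.List.pySetD_natCast]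
    set v1 := max (pvCell a 0 0) (pvCell a 1 0) with hv1
    set v2 := max (max (max (pvCell a 0 0) (pvCell a 0 1)) (pvCell a 1 0)) (pvCell a 1 1) with hv2
    have hset2 : PySem.List.pySetD ((List.replicate (N + 1) (0 : Int)).set 1 v1) 2 v2
        = ((List.replicate (N + 1) (0 : Int)).set 1 v1).set 2 v2 := by
      rw [show (2 : Int) = ((2 : Nat) : Int) by norm_num, PySem.List.pySetD_natCast]
    rw [hset1, hset2]
    have h3c : ((3 : Nat) : Int) = (3 : Int) := by norm_num
    rw [← h3c]
    refine a_loop a N (N + 1 - 3) 3 _ rfl (by omega) (by omega) (by simp) ?_ N (by omega) (by omega)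
    intro j hj1 hjk
    interval_cases j
    · rw [getD_set_ne _ _ _ _ (by omega), getD_set_self _ _ _ (by simp; omega)]
      rw [hv1, htop.1, htop.2.1]
      simp [pvF]
    · rw [getD_set_self _ _ _ (by simp; omega)]
      rw [hv2, htop.1, htop.2.1, htop.2.2.1, htop.2.2.2]
      simp [pvF]
  rw [PySem.List.pyGetD_natCast, hA, pvFB_eq, Int.toNat_natCast]
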